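-- pv_equiv track=rewrite | github.com/behzadz1/dermafocus-clinical-intelligence-agent--4- | backend/app/utils/metadata_enrichment.py | _infer_audience
-- ===== SOURCE A (Python) =====
-- AUDIENCE_TERMS = {
--     "patient": ["patient", "consumer", "before and after", "brochure"],
--     "hcp": ["physician", "doctor", "clinic", "protocol", "contraindication", "injection"],
-- }
--
-- def _infer_audience(doc_type: str, source_blob: str) -> str:
--     doc_type_lower = (doc_type or "").lower()
--     if doc_type_lower in {"brochure"}:
--         return "patient"
--     for audience, terms in AUDIENCE_TERMS.items():
--         if any(term in source_blob for term in terms):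
--             return audience
--     return "hcp"
-- ===== SOURCE B (Python) =====
-- PATIENT_TERMS = ["patient", "consumer", "before and after", "brochure"]
--
-- def _infer_audience(doc_type: str, source_blob: str) -> str:
--     if (doc_type or "").lower() == "brochure":
--         return "patient"
--     return "patient" if any(t in source_blob for t in PATIENT_TERMS) else "hcp"
-- ===== Notes on version B (the rewrite author's own statement) =====
-- stated objective: simpler
-- what changed: B drops A's dead hcp-term scan and the generic dict loop: after the brochure guard it decides the result with one membership pass over the patient term list (A's hcp branch and its fallthrough both return 'hcp', so the second scan never matters).
import Mathlib
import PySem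

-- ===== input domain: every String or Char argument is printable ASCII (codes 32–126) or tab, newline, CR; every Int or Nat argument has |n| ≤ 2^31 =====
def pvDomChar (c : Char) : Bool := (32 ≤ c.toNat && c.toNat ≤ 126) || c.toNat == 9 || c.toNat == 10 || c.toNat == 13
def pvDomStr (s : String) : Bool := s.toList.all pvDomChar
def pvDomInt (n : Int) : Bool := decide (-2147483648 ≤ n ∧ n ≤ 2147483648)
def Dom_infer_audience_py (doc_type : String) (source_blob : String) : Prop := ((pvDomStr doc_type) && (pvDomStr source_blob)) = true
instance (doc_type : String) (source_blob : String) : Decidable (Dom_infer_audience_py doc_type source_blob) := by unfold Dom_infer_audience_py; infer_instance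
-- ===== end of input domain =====

-- B drops A's dead hcp-term scan and generic dict loop: one membership pass over the patient terms decides the result (objective: simpler).

-- ===== PORT A =====
def pyAudienceTerms : List (String × List String) :=
  [("patient", ["patient", "consumer", "before and after", "brochure"]),
   ("hcp", ["physician", "doctor", "clinic", "protocol", "contraindication", "injection"])]

-- the 'for audience, terms in AUDIENCE_TERMS.items():' loop with its early returns
def inferAudienceLoop (source_blob : String) : List (String × List String) → String
  | [] => "hcp"
  | (audience, terms) :: rest =>
      if terms.any (fun term => PySem.Str.isIn term source_blob) then audience
      else inferAudienceLoop source_blob rest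

def infer_audience_py (doc_type : String) (source_blob : String) : String :=
  let doc_type_lower := PySem.Str.lower (if doc_type = "" then "" else doc_type)  -- (doc_type or "").lower()
  if doc_type_lower = "brochure" then "patient"
  else inferAudienceLoop source_blob pyAudienceTerms

-- ===== PORT B =====
def pyPatientTerms : List String := ["patient", "consumer", "before and after", "brochure"]

def infer_audience_py_alt (doc_type : String) (source_blob : String) : String :=
  if PySem.Str.lower (if doc_type = "" then "" else doc_type) = "brochure" then "patient"
  else if pyPatientTerms.any (fun t => PySem.Str.isIn t source_blob) then "patient" else "hcp"

-- ===== PRECONDITION & SPEC =====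
def Spec_infer_audience_py (doc_type : String) (source_blob : String) (out : String) : Prop := out = infer_audience_py_alt doc_type source_blob
instance (doc_type : String) (source_blob : String) (out : String) : Decidable (Spec_infer_audience_py doc_type source_blob out) := by unfold Spec_infer_audience_py; infer_instance

-- ===== CLAIM (what is proved, stated in full; the proofs are below) =====
def Claim_equal_infer_audience_py : Prop := ∀ (doc_type : String) (source_blob : String), Dom_infer_audience_py doc_type source_blob → Spec_infer_audience_py doc_type source_blob (infer_audience_py doc_type source_blob)

-- ===== LEMMAS AND PROOFS =====

-- ===== VERDICT (by name: the statement is the Claim_ definition above) =====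
theorem infer_audience_py_spec : Claim_equal_infer_audience_py := by
  intro doc_type source_blob _
  unfold Spec_infer_audience_py infer_audience_py infer_audience_py_alt
  simp only [inferAudienceLoop, pyAudienceTerms, pyPatientTerms]
  split_ifs <;> rfl
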